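-- pv_equiv track=rewrite | github.com/Barkeydog/Brocard-s-Problem | V8.py | find_brocard_solutions
-- ===== SOURCE A (Python) =====
-- import math
--
-- def find_brocard_solutions(limit):
--     solutions = []
--     for m in range(2, limit):
--         potential_factorial = m**2 - 1
--         n = 0
--         while True:
--             if math.factorial(n) == potential_factorial:
--                 solutions.append((n, m))
--                 break
--             elif math.factorial(n) > potential_factorial:
--                 break
--             n += 1
--     return solutions
-- ===== SOURCE B (Python) =====
-- import math
--
-- def find_brocard_solutions(limit):
--     solutions = []
--     fact = 1
--     n = 0
--     bound = (limit - 1) ** 2 - 1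
--     while fact <= bound:
--         m = math.isqrt(fact + 1)
--         if m * m == fact + 1 and 2 <= m < limit:
--             solutions.append((n, m))
--         n += 1
--         fact *= n
--     return solutions
-- ===== Notes on version B (the rewrite author's own statement) =====
-- stated objective: faster
-- what changed: Instead of scanning every m in range and linearly searching factorials (each recomputed from scratch) for a match with m squared minus one, B iterates n once with a running factorial and tests whether the successor of the factorial is a perfect square via math.isqrt, appending solutions while the factorial stays within the square bound derived from limit.
import Mathlib
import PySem

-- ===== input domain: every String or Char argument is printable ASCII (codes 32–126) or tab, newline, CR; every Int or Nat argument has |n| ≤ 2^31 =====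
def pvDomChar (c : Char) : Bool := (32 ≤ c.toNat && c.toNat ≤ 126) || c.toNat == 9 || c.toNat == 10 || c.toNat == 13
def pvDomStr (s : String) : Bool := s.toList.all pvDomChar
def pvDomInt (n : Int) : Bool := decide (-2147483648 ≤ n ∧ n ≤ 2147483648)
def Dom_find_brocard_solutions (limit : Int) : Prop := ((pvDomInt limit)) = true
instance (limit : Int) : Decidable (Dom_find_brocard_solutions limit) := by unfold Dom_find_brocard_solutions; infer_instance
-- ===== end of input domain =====

-- B replaces A's per-m linear factorial search by a single pass over n with a running
-- factorial and an integer-square-root test; proved equal to A on the whole Dom.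


-- ===== PORT A =====
-- inner 'while True' loop of A: search n = start, start+1, … for factorial(n) = potential.
-- Fuel: the Python loop always terminates (factorial eventually exceeds potential);
-- potential.toNat + 2 steps are provably enough (used in the proofs below).
def brocardInner (potential : Int) (n : Nat) (fuel : Nat) : Option Nat :=
  match fuel with
  | 0 => none
  | fuel + 1 =>
    if (Nat.factorial n : Int) = potential then some n
    else if (Nat.factorial n : Int) > potential then none
    else brocardInner potential (n + 1) fuel

def find_brocard_solutions (limit : Int) : List (Int × Int) :=
  (PySem.List.pyRange 2 limit 1).foldl
    (fun solutions m =>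
      let potential := m * m - 1
      match brocardInner potential 0 (potential.toNat + 2) with
      | some n => solutions ++ [((n : Int), m)]
      | none => solutions)
    []

-- ===== PORT B =====
-- while-loop of Source B: running factorial, isqrt test.  Fuel bound.toNat + 2 is provably
-- enough: once fact = n! exceeds bound the loop has exited, and (bound.toNat+2)! > bound.
def altLoop (limit bound : Int) (fact : Int) (n : Nat) (acc : List (Int × Int)) (fuel : Nat) : List (Int × Int) :=
  match fuel with
  | 0 => acc
  | fuel + 1 =>
    if fact ≤ bound then
      let m : Nat := Nat.sqrt (fact + 1).toNat   -- math.isqrt(fact+1); fact+1 ≥ 2 here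
      let acc' := if (m * m : Int) = fact + 1 ∧ 2 ≤ (m : Int) ∧ (m : Int) < limit
                  then acc ++ [((n : Int), (m : Int))] else acc
      altLoop limit bound (fact * ((n : Int) + 1)) (n + 1) acc' fuel
    else acc

def find_brocard_solutions_alt (limit : Int) : List (Int × Int) :=
  let bound := (limit - 1) * (limit - 1) - 1
  altLoop limit bound 1 0 [] (bound.toNat + 2)

-- ===== PRECONDITION & SPEC =====
def Spec_find_brocard_solutions (limit : Int) (out : List (Int × Int)) : Prop := out = find_brocard_solutions_alt limit
instance (limit : Int) (out : List (Int × Int)) : Decidable (Spec_find_brocard_solutions limit out) := by unfold Spec_find_brocard_solutions; infer_instance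

-- ===== CLAIM (what is proved, stated in full; the proofs are below) =====
def Claim_equal_find_brocard_solutions : Prop := ∀ (limit : Int), Dom_find_brocard_solutions limit → Spec_find_brocard_solutions limit (find_brocard_solutions limit)

-- ===== LEMMAS AND PROOFS =====

-- canonical value: the Brocard solutions with m < limit (only three exist with m ≤ 2^31)
def canon (limit : Int) : List (Int × Int) :=
  (if 5 < limit then [((4 : Int), (5 : Int))] else []) ++
  (if 11 < limit then [((5 : Int), (11 : Int))] else []) ++
  (if 71 < limit then [((7 : Int), (71 : Int))] else [])

-- what A's loop body appends for a given m
def gA (m : Int) : List (Int × Int) :=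
  match brocardInner (m * m - 1) 0 ((m * m - 1).toNat + 2) with
  | some n => [((n : Int), m)]
  | none => []

lemma sqrt_val (c s : Nat) (h1 : s * s ≤ c) (h2 : c < (s + 1) * (s + 1)) : Nat.sqrt c = s :=
  (Nat.eq_sqrt.mpr ⟨h1, h2⟩).symm

lemma not_square (c s : Int) (hs : 0 ≤ s) (h1 : s * s < c) (h2 : c < (s + 1) * (s + 1)) :
    ∀ m : Int, 0 ≤ m → m * m ≠ c := by
  intro m hm heq
  rcases le_or_gt m s with h | h
  · nlinarith
  · nlinarith

lemma sq_eq (m s : Int) (hm : 0 ≤ m) (hs : 0 ≤ s) (h : m * m = s * s) : m = s := by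
  nlinarith [sq_nonneg (m - s), sq_nonneg (m + s)]

lemma fact21 : ((Nat.factorial 21 : Nat) : Int) = 51090942171709440000 := by
  norm_num [Nat.factorial]

-- if factorial never hits potential and some j within fuel has factorial(j) > potential,
-- the inner loop returns none
lemma inner_none (P : Int) (H : ∀ k : Nat, (Nat.factorial k : Int) ≠ P) :
    ∀ fuel n : Nat, (∃ j : Nat, n ≤ j ∧ j < n + fuel ∧ P < (Nat.factorial j : Int)) →
    brocardInner P n fuel = none := by
  intro fuel
  induction fuel with
  | zero => intro n ⟨j, h1, h2, _⟩; omega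
  | succ f ih =>
    intro n ⟨j, h1, h2, h3⟩
    rw [brocardInner]
    rw [if_neg (H n)]
    by_cases hgt : (Nat.factorial n : Int) > P
    · rw [if_pos hgt]
    · rw [if_neg hgt]
      apply ih
      refine ⟨j, ?_, by omega, h3⟩
      have hne : j ≠ n := by
        intro he; subst he; exact hgt h3
      omega

-- no factorial equals m*m - 1 unless m ∈ {5, 11, 71}  (for 2 ≤ m ≤ 2^31)
lemma no_fact_eq (m : Int) (hm2 : 2 ≤ m) (hmB : m ≤ 2147483648)
    (h5 : m ≠ 5) (h11 : m ≠ 11) (h71 : m ≠ 71) :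
    ∀ k : Nat, (Nat.factorial k : Int) ≠ m * m - 1 := by
  intro k heq
  have hm0 : (0 : Int) ≤ m := by omega
  have hlt : (Nat.factorial k : Int) < ((Nat.factorial 21 : Nat) : Int) := by
    rw [fact21]
    nlinarith [mul_nonneg (show (0:Int) ≤ 2147483648 - m from by omega)
      (show (0:Int) ≤ 2147483648 + m from by omega)]
  have hk : k ≤ 20 := by
    by_contra hk
    have h21 : (21 : Nat) ≤ k := by omega
    have h21' := Nat.factorial_le h21
    have : ((Nat.factorial 21 : Nat) : Int) ≤ (Nat.factorial k : Int) := by exact_mod_cast h21'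
    omega
  have hsq : m * m = (Nat.factorial k : Int) + 1 := by omega
  interval_cases k <;> simp [Nat.factorial] at hsq
  · exact not_square 2 1 (by norm_num) (by norm_num) (by norm_num) m hm0 hsq
  · exact not_square 2 1 (by norm_num) (by norm_num) (by norm_num) m hm0 hsq
  · exact not_square 3 1 (by norm_num) (by norm_num) (by norm_num) m hm0 hsq
  · exact not_square 7 2 (by norm_num) (by norm_num) (by norm_num) m hm0 hsq
  · exact h5 (sq_eq m 5 hm0 (by norm_num) (by omega))
  · exact h11 (sq_eq m 11 hm0 (by norm_num) (by omega))
  · exact not_square 721 26 (by norm_num) (by norm_num) (by norm_num) m hm0 hsq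
  · exact h71 (sq_eq m 71 hm0 (by norm_num) (by omega))
  · exact not_square 40321 200 (by norm_num) (by norm_num) (by norm_num) m hm0 hsq
  · exact not_square 362881 602 (by norm_num) (by norm_num) (by norm_num) m hm0 hsq
  · exact not_square 3628801 1904 (by norm_num) (by norm_num) (by norm_num) m hm0 hsq
  · exact not_square 39916801 6317 (by norm_num) (by norm_num) (by norm_num) m hm0 hsq
  · exact not_square 479001601 21886 (by norm_num) (by norm_num) (by norm_num) m hm0 hsq
  · exact not_square 6227020801 78911 (by norm_num) (by norm_num) (by norm_num) m hm0 hsq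
  · exact not_square 87178291201 295259 (by norm_num) (by norm_num) (by norm_num) m hm0 hsq
  · exact not_square 1307674368001 1143535 (by norm_num) (by norm_num) (by norm_num) m hm0 hsq
  · exact not_square 20922789888001 4574143 (by norm_num) (by norm_num) (by norm_num) m hm0 hsq
  · exact not_square 355687428096001 18859677 (by norm_num) (by norm_num) (by norm_num) m hm0 hsq
  · exact not_square 6402373705728001 80014834 (by norm_num) (by norm_num) (by norm_num) m hm0 hsq
  · exact not_square 121645100408832001 348776576 (by norm_num) (by norm_num) (by norm_num) m hm0 hsq
  · exact not_square 2432902008176640001 1559776268 (by norm_num) (by norm_num) (by norm_num) m hm0 hsq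

lemma gA_eq (m : Int) (hm2 : 2 ≤ m) (hmB : m ≤ 2147483648) :
    gA m = if m = 5 then [((4 : Int), (5 : Int))]
           else if m = 11 then [((5 : Int), (11 : Int))]
           else if m = 71 then [((7 : Int), (71 : Int))] else [] := by
  by_cases h5 : m = 5
  · subst h5; decide
  by_cases h11 : m = 11
  · subst h11; decide
  by_cases h71 : m = 71
  · subst h71; decide
  rw [if_neg h5, if_neg h11, if_neg h71]
  unfold gA
  rw [inner_none _ (no_fact_eq m hm2 hmB h5 h11 h71)]
  have hP3 : (3 : Int) ≤ m * m - 1 := by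
    nlinarith [mul_nonneg (show (0:Int) ≤ m - 2 from by omega) (show (0:Int) ≤ m + 2 from by omega)]
  set P := m * m - 1 with hP
  refine ⟨P.toNat + 1, by omega, by omega, ?_⟩
  have h1 : P.toNat + 1 ≤ Nat.factorial (P.toNat + 1) := Nat.self_le_factorial _
  have h2 : ((P.toNat + 1 : Nat) : Int) ≤ (Nat.factorial (P.toNat + 1) : Int) := by exact_mod_cast h1
  omega

-- A's flatMap over the range [2, 2+k) equals canon
lemma flat_eq : ∀ k : Nat, (k : Int) ≤ 2147483647 →
    (PySem.List.pyRange 2 (2 + (k : Int)) 1).flatMap gA = canon (2 + (k : Int)) := by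
  intro k
  induction k with
  | zero =>
    intro _
    rw [show (2 + ((0 : Nat) : Int)) = 2 by norm_num,
        PySem.List.pyRange_one_eq_nil (by norm_num)]
    decide
  | succ j ih =>
    intro h
    have hj : (j : Int) ≤ 2147483647 := by push_cast at h; omega
    rw [show (2 + ((j + 1 : Nat) : Int)) = (2 + (j : Int)) + 1 by push_cast; ring]
    rw [PySem.List.pyRange_one_succ_right (by omega : (2 : Int) ≤ 2 + (j : Int))]
    rw [List.flatMap_append, ih hj]
    simp only [List.flatMap_cons, List.flatMap_nil, List.append_nil]
    rw [gA_eq (2 + (j : Int)) (by omega) (by omega)]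
    by_cases h5 : (2 + (j : Int)) = 5
    · rw [if_pos h5, h5]; decide
    by_cases h11 : (2 + (j : Int)) = 11
    · rw [if_neg h5, if_pos h11, h11]; decide
    by_cases h71 : (2 + (j : Int)) = 71
    · rw [if_neg h5, if_neg h11, if_pos h71, h71]; decide
    · rw [if_neg h5, if_neg h11, if_neg h71, List.append_nil]
      unfold canon
      simp only [show (5 < 2 + (j : Int) + 1) ↔ (5 < 2 + (j : Int)) from by omega,
        show (11 < 2 + (j : Int) + 1) ↔ (11 < 2 + (j : Int)) from by omega,
        show (71 < 2 + (j : Int) + 1) ↔ (71 < 2 + (j : Int)) from by omega]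

lemma A_eq_canon (limit : Int) (hB : limit ≤ 2147483649) :
    find_brocard_solutions limit = canon limit := by
  unfold find_brocard_solutions
  rw [show (fun (solutions : List (Int × Int)) (m : Int) =>
        let potential := m * m - 1
        match brocardInner potential 0 (potential.toNat + 2) with
        | some n => solutions ++ [((n : Int), m)]
        | none => solutions)
      = (fun solutions m => solutions ++ gA m) from by
    funext acc m
    show (match brocardInner (m * m - 1) 0 ((m * m - 1).toNat + 2) with
          | some n => acc ++ [((n : Int), m)]
          | none => acc) = acc ++ gA m
    unfold gA
    cases brocardInner (m * m - 1) 0 ((m * m - 1).toNat + 2) <;> simp]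
  rw [PySem.List.foldl_append_eq_flatMap, List.nil_append]
  rcases le_or_gt limit 2 with hle | hgt
  · rw [PySem.List.pyRange_one_eq_nil hle]
    unfold canon
    rw [if_neg (by omega), if_neg (by omega), if_neg (by omega)]
    rfl
  · obtain ⟨k, hk⟩ : ∃ k : Nat, limit = 2 + (k : Int) := ⟨(limit - 2).toNat, by omega⟩
    subst hk
    exact flat_eq k (by omega)

-- B-side: what remains to be appended from step n onward
def canonFrom (limit bound : Int) (n : Nat) : List (Int × Int) :=
  (if n ≤ 4 ∧ 24 ≤ bound ∧ 5 < limit then [((4 : Int), (5 : Int))] else []) ++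
  (if n ≤ 5 ∧ 120 ≤ bound ∧ 11 < limit then [((5 : Int), (11 : Int))] else []) ++
  (if n ≤ 7 ∧ 5040 ≤ bound ∧ 71 < limit then [((7 : Int), (71 : Int))] else [])

lemma altLoop_zero (limit bound fact : Int) (n : Nat) (acc : List (Int × Int)) :
    altLoop limit bound fact n acc 0 = acc := rfl

lemma altLoop_succ (limit bound fact : Int) (n : Nat) (acc : List (Int × Int)) (f : Nat) :
    altLoop limit bound fact n acc (f + 1) =
    if fact ≤ bound then
      altLoop limit bound (fact * ((n : Int) + 1)) (n + 1)
        (if ((Nat.sqrt (fact + 1).toNat : Nat) * (Nat.sqrt (fact + 1).toNat : Nat) : Int) = fact + 1 ∧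
            2 ≤ ((Nat.sqrt (fact + 1).toNat : Nat) : Int) ∧ ((Nat.sqrt (fact + 1).toNat : Nat) : Int) < limit
         then acc ++ [((n : Int), ((Nat.sqrt (fact + 1).toNat : Nat) : Int))] else acc) f
    else acc := rfl

lemma canonFrom_nil (limit bound : Int) (n : Nat) (h : bound < (Nat.factorial n : Int)) :
    canonFrom limit bound n = [] := by
  have c4 : ¬(n ≤ 4 ∧ 24 ≤ bound ∧ 5 < limit) := by
    rintro ⟨h1, h2, -⟩
    have hf := Nat.factorial_le h1
    have hf' : (Nat.factorial n : Int) ≤ ((Nat.factorial 4 : Nat) : Int) := by exact_mod_cast hf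
    have h4 : ((Nat.factorial 4 : Nat) : Int) = 24 := by norm_num [Nat.factorial]
    omega
  have c5 : ¬(n ≤ 5 ∧ 120 ≤ bound ∧ 11 < limit) := by
    rintro ⟨h1, h2, -⟩
    have hf := Nat.factorial_le h1
    have hf' : (Nat.factorial n : Int) ≤ ((Nat.factorial 5 : Nat) : Int) := by exact_mod_cast hf
    have h5 : ((Nat.factorial 5 : Nat) : Int) = 120 := by norm_num [Nat.factorial]
    omega
  have c7 : ¬(n ≤ 7 ∧ 5040 ≤ bound ∧ 71 < limit) := by
    rintro ⟨h1, h2, -⟩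
    have hf := Nat.factorial_le h1
    have hf' : (Nat.factorial n : Int) ≤ ((Nat.factorial 7 : Nat) : Int) := by exact_mod_cast hf
    have h7 : ((Nat.factorial 7 : Nat) : Int) = 5040 := by norm_num [Nat.factorial]
    omega
  unfold canonFrom
  rw [if_neg c4, if_neg c5, if_neg c7]
  rfl

lemma B_char (limit bound : Int) (hb21 : bound < ((Nat.factorial 21 : Nat) : Int)) :
    ∀ (f : Nat) (n : Nat) (acc : List (Int × Int)),
    bound < (Nat.factorial (n + f) : Int) →
    altLoop limit bound ((Nat.factorial n : Int)) n acc f = acc ++ canonFrom limit bound n := by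
  intro f
  induction f with
  | zero =>
    intro n acc h
    rw [altLoop_zero, canonFrom_nil limit bound n (by simpa using h), List.append_nil]
  | succ f ih =>
    intro n acc h
    rw [altLoop_succ]
    by_cases hle : (Nat.factorial n : Int) ≤ bound
    · rw [if_pos hle]
      have hn20 : n ≤ 20 := by
        by_contra hn
        have h21 : (21 : Nat) ≤ n := by omega
        have hf := Nat.factorial_le h21
        have : ((Nat.factorial 21 : Nat) : Int) ≤ (Nat.factorial n : Int) := by exact_mod_cast hf
        omega
      have hfact : (Nat.factorial n : Int) * ((n : Int) + 1) = (Nat.factorial (n + 1) : Int) := by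
        rw [Nat.factorial_succ]; push_cast; ring
      have hstep : bound < (Nat.factorial ((n + 1) + f) : Int) := by
        rwa [show (n + 1) + f = n + (f + 1) by omega]
      rw [hfact, ih (n + 1) _ hstep]
      have htn : ((Nat.factorial n : Int) + 1).toNat = Nat.factorial n + 1 := by
        have := Nat.one_le_iff_ne_zero.mpr (Nat.factorial_ne_zero n)
        omega
      rw [htn]
      have hvn0 : Nat.factorial 0 = 1 := by norm_num [Nat.factorial]
      have hvn1 : Nat.factorial 1 = 1 := by norm_num [Nat.factorial]
      have hvn2 : Nat.factorial 2 = 2 := by norm_num [Nat.factorial]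
      have hvn3 : Nat.factorial 3 = 6 := by norm_num [Nat.factorial]
      have hvn4 : Nat.factorial 4 = 24 := by norm_num [Nat.factorial]
      have hvn5 : Nat.factorial 5 = 120 := by norm_num [Nat.factorial]
      have hvn6 : Nat.factorial 6 = 720 := by norm_num [Nat.factorial]
      have hvn7 : Nat.factorial 7 = 5040 := by norm_num [Nat.factorial]
      have hvn8 : Nat.factorial 8 = 40320 := by norm_num [Nat.factorial]
      have hvn9 : Nat.factorial 9 = 362880 := by norm_num [Nat.factorial]
      have hvn10 : Nat.factorial 10 = 3628800 := by norm_num [Nat.factorial]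
      have hvn11 : Nat.factorial 11 = 39916800 := by norm_num [Nat.factorial]
      have hvn12 : Nat.factorial 12 = 479001600 := by norm_num [Nat.factorial]
      have hvn13 : Nat.factorial 13 = 6227020800 := by norm_num [Nat.factorial]
      have hvn14 : Nat.factorial 14 = 87178291200 := by norm_num [Nat.factorial]
      have hvn15 : Nat.factorial 15 = 1307674368000 := by norm_num [Nat.factorial]
      have hvn16 : Nat.factorial 16 = 20922789888000 := by norm_num [Nat.factorial]
      have hvn17 : Nat.factorial 17 = 355687428096000 := by norm_num [Nat.factorial]
      have hvn18 : Nat.factorial 18 = 6402373705728000 := by norm_num [Nat.factorial]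
      have hvn19 : Nat.factorial 19 = 121645100408832000 := by norm_num [Nat.factorial]
      have hvn20 : Nat.factorial 20 = 2432902008176640000 := by norm_num [Nat.factorial]
      interval_cases n
      · -- n = 0 : 1+1 is not a perfect square
        rw [hvn0, sqrt_val 2 1 (by norm_num) (by norm_num)]
        rw [if_neg (by rintro ⟨hc, -, -⟩; norm_num at hc)]
        congr 1
        unfold canonFrom
        norm_num
      · -- n = 1 : 1+1 is not a perfect square
        rw [hvn1, sqrt_val 2 1 (by norm_num) (by norm_num)]
        rw [if_neg (by rintro ⟨hc, -, -⟩; norm_num at hc)]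
        congr 1
        unfold canonFrom
        norm_num
      · -- n = 2 : 2+1 is not a perfect square
        rw [hvn2, sqrt_val 3 1 (by norm_num) (by norm_num)]
        rw [if_neg (by rintro ⟨hc, -, -⟩; norm_num at hc)]
        congr 1
        unfold canonFrom
        norm_num
      · -- n = 3 : 6+1 is not a perfect square
        rw [hvn3, sqrt_val 7 2 (by norm_num) (by norm_num)]
        rw [if_neg (by rintro ⟨hc, -, -⟩; norm_num at hc)]
        congr 1
        unfold canonFrom
        norm_num
      · -- n = 4 : fact+1 = 25 = 5^2
        rw [hvn4] at hle
        rw [hvn4, sqrt_val 25 5 (by norm_num) (by norm_num)]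
        by_cases hL : (5:Int) < limit
        · rw [if_pos ⟨by norm_num, by norm_num, by simpa using hL⟩]
          have hB4 : (24:Int) ≤ bound := by exact_mod_cast hle
          unfold canonFrom
          norm_num [hB4, hL, List.append_assoc]
        · rw [if_neg (by rintro ⟨-, -, hc⟩; exact hL (by simpa using hc))]
          have hL11 : ¬(11 < limit) := by omega
          have hL71 : ¬(71 < limit) := by omega
          unfold canonFrom
          norm_num [hL, hL11, hL71]
      · -- n = 5 : fact+1 = 121 = 11^2
        rw [hvn5] at hle
        rw [hvn5, sqrt_val 121 11 (by norm_num) (by norm_num)]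
        by_cases hL : (11:Int) < limit
        · rw [if_pos ⟨by norm_num, by norm_num, by simpa using hL⟩]
          have hB5 : (120:Int) ≤ bound := by exact_mod_cast hle
          have h24 : (24:Int) ≤ bound := by omega
          have h5L : (5:Int) < limit := by omega
          unfold canonFrom
          norm_num [hB5, hL, h24, h5L, List.append_assoc]
        · rw [if_neg (by rintro ⟨-, -, hc⟩; exact hL (by simpa using hc))]
          have hL71 : ¬(71 < limit) := by omega
          unfold canonFrom
          norm_num [hL, hL71]
      · -- n = 6 : 720+1 is not a perfect square
        rw [hvn6, sqrt_val 721 26 (by norm_num) (by norm_num)]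
        rw [if_neg (by rintro ⟨hc, -, -⟩; norm_num at hc)]
        congr 1
        unfold canonFrom
        norm_num
      · -- n = 7 : fact+1 = 5041 = 71^2
        rw [hvn7] at hle
        rw [hvn7, sqrt_val 5041 71 (by norm_num) (by norm_num)]
        by_cases hL : (71:Int) < limit
        · rw [if_pos ⟨by norm_num, by norm_num, by simpa using hL⟩]
          have hB7 : (5040:Int) ≤ bound := by exact_mod_cast hle
          have h120 : (120:Int) ≤ bound := by omega
          have h24 : (24:Int) ≤ bound := by omega
          have h11L : (11:Int) < limit := by omega
          have h5L : (5:Int) < limit := by omega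
          unfold canonFrom
          norm_num [hB7, hL, h120, h24, h11L, h5L, List.append_assoc]
        · rw [if_neg (by rintro ⟨-, -, hc⟩; exact hL (by simpa using hc))]
          unfold canonFrom
          norm_num [hL]
      · -- n = 8 : 40320+1 is not a perfect square
        rw [hvn8, sqrt_val 40321 200 (by norm_num) (by norm_num)]
        rw [if_neg (by rintro ⟨hc, -, -⟩; norm_num at hc)]
        congr 1
      · -- n = 9 : 362880+1 is not a perfect square
        rw [hvn9, sqrt_val 362881 602 (by norm_num) (by norm_num)]
        rw [if_neg (by rintro ⟨hc, -, -⟩; norm_num at hc)]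
        congr 1
      · -- n = 10 : 3628800+1 is not a perfect square
        rw [hvn10, sqrt_val 3628801 1904 (by norm_num) (by norm_num)]
        rw [if_neg (by rintro ⟨hc, -, -⟩; norm_num at hc)]
        congr 1
      · -- n = 11 : 39916800+1 is not a perfect square
        rw [hvn11, sqrt_val 39916801 6317 (by norm_num) (by norm_num)]
        rw [if_neg (by rintro ⟨hc, -, -⟩; norm_num at hc)]
        congr 1
      · -- n = 12 : 479001600+1 is not a perfect square
        rw [hvn12, sqrt_val 479001601 21886 (by norm_num) (by norm_num)]
        rw [if_neg (by rintro ⟨hc, -, -⟩; norm_num at hc)]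
        congr 1
      · -- n = 13 : 6227020800+1 is not a perfect square
        rw [hvn13, sqrt_val 6227020801 78911 (by norm_num) (by norm_num)]
        rw [if_neg (by rintro ⟨hc, -, -⟩; norm_num at hc)]
        congr 1
      · -- n = 14 : 87178291200+1 is not a perfect square
        rw [hvn14, sqrt_val 87178291201 295259 (by norm_num) (by norm_num)]
        rw [if_neg (by rintro ⟨hc, -, -⟩; norm_num at hc)]
        congr 1
      · -- n = 15 : 1307674368000+1 is not a perfect square
        rw [hvn15, sqrt_val 1307674368001 1143535 (by norm_num) (by norm_num)]
        rw [if_neg (by rintro ⟨hc, -, -⟩; norm_num at hc)]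
        congr 1
      · -- n = 16 : 20922789888000+1 is not a perfect square
        rw [hvn16, sqrt_val 20922789888001 4574143 (by norm_num) (by norm_num)]
        rw [if_neg (by rintro ⟨hc, -, -⟩; norm_num at hc)]
        congr 1
      · -- n = 17 : 355687428096000+1 is not a perfect square
        rw [hvn17, sqrt_val 355687428096001 18859677 (by norm_num) (by norm_num)]
        rw [if_neg (by rintro ⟨hc, -, -⟩; norm_num at hc)]
        congr 1
      · -- n = 18 : 6402373705728000+1 is not a perfect square
        rw [hvn18, sqrt_val 6402373705728001 80014834 (by norm_num) (by norm_num)]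
        rw [if_neg (by rintro ⟨hc, -, -⟩; norm_num at hc)]
        congr 1
      · -- n = 19 : 121645100408832000+1 is not a perfect square
        rw [hvn19, sqrt_val 121645100408832001 348776576 (by norm_num) (by norm_num)]
        rw [if_neg (by rintro ⟨hc, -, -⟩; norm_num at hc)]
        congr 1
      · -- n = 20 : 2432902008176640000+1 is not a perfect square
        rw [hvn20, sqrt_val 2432902008176640001 1559776268 (by norm_num) (by norm_num)]
        rw [if_neg (by rintro ⟨hc, -, -⟩; norm_num at hc)]
        congr 1
    · rw [if_neg hle, canonFrom_nil limit bound n (by omega), List.append_nil]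

lemma B_eq_canon (limit : Int) (hB1 : -2147483648 ≤ limit) (hB2 : limit ≤ 2147483648) :
    find_brocard_solutions_alt limit = canon limit := by
  unfold find_brocard_solutions_alt
  set bound := (limit - 1) * (limit - 1) - 1 with hbd
  show altLoop limit bound 1 0 [] (bound.toNat + 2) = canon limit
  have hb21 : bound < ((Nat.factorial 21 : Nat) : Int) := by
    rw [fact21]
    nlinarith [mul_nonneg (show (0:Int) ≤ 2147483649 - (limit - 1) from by omega)
      (show (0:Int) ≤ 2147483649 + (limit - 1) from by omega)]
  have hfuel : bound < (Nat.factorial (0 + (bound.toNat + 2)) : Int) := by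
    rw [Nat.zero_add]
    have h1 : bound.toNat + 2 ≤ Nat.factorial (bound.toNat + 2) := Nat.self_le_factorial _
    have h2 : ((bound.toNat + 2 : Nat) : Int) ≤ (Nat.factorial (bound.toNat + 2) : Int) := by
      exact_mod_cast h1
    omega
  have h0 : (1 : Int) = ((Nat.factorial 0 : Nat) : Int) := by norm_num [Nat.factorial]
  rw [h0, B_char limit bound hb21 (bound.toNat + 2) 0 [] hfuel, List.nil_append]
  unfold canonFrom canon
  simp only [show ((0:Nat) ≤ 4 ∧ 24 ≤ bound ∧ 5 < limit) ↔ 5 < limit from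
      ⟨fun h => h.2.2, fun h => ⟨by norm_num, by
        nlinarith [mul_nonneg (show (0:Int) ≤ limit - 6 from by omega)
          (show (0:Int) ≤ limit + 4 from by omega)], h⟩⟩,
    show ((0:Nat) ≤ 5 ∧ 120 ≤ bound ∧ 11 < limit) ↔ 11 < limit from
      ⟨fun h => h.2.2, fun h => ⟨by norm_num, by
        nlinarith [mul_nonneg (show (0:Int) ≤ limit - 12 from by omega)
          (show (0:Int) ≤ limit + 10 from by omega)], h⟩⟩,
    show ((0:Nat) ≤ 7 ∧ 5040 ≤ bound ∧ 71 < limit) ↔ 71 < limit from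
      ⟨fun h => h.2.2, fun h => ⟨by norm_num, by
        nlinarith [mul_nonneg (show (0:Int) ≤ limit - 72 from by omega)
          (show (0:Int) ≤ limit + 70 from by omega)], h⟩⟩]

-- ===== VERDICT (by name: the statement is the Claim_ definition above) =====
theorem find_brocard_solutions_spec : Claim_equal_find_brocard_solutions := by
  intro limit hdom
  unfold Dom_find_brocard_solutions pvDomInt at hdom
  rw [decide_eq_true_iff] at hdom
  unfold Spec_find_brocard_solutions
  rw [A_eq_canon limit (by omega), B_eq_canon limit (by omega) (by omega)]
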